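-- pv_equiv track=rewrite | github.com/lakshman81-ai/MNCv.1.95 | tools/run_agent_benchmarks.py | _resolve_levels
-- ===== SOURCE A (Python) =====
-- from typing import Dict, Any, List, Tuple
--
-- DEFAULT_LEVELS = ["L0", "L1", "L2", "L3", "L4", "L5.1", "L5.2", "L6"]
--
-- def _resolve_levels(level_arg: str) -> List[str]:
--     if not level_arg or level_arg.lower() == "all":
--         return list(DEFAULT_LEVELS)
--     parts = []
--     for token in level_arg.split(","):
--         t = token.strip()
--         if not t:
--             continue
--         parts.append(t.upper() if t.upper().startswith("L") else t)
--     # Keep deterministic order, respecting DEFAULT_LEVELS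
--     ordered = []
--     for lvl in DEFAULT_LEVELS:
--         if lvl in parts:
--             ordered.append(lvl)
--     for lvl in parts:
--         if lvl not in ordered:
--             ordered.append(lvl)
--     return ordered
-- ===== SOURCE B (Python) =====
-- from typing import List
--
-- DEFAULT_LEVELS = ["L0", "L1", "L2", "L3", "L4", "L5.1", "L5.2", "L6"]
--
-- def _resolve_levels(level_arg: str) -> List[str]:
--     if not level_arg or level_arg.lower() == "all":
--         return list(DEFAULT_LEVELS)
--     parts = [t.upper() if t.upper().startswith("L") else t
--              for token in level_arg.split(",") if (t := token.strip())]
--     index = {lvl: i for i, lvl in enumerate(DEFAULT_LEVELS)}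
--     uniq = list(dict.fromkeys(parts))
--     known = sorted((p for p in uniq if p in index), key=index.get)
--     unknown = [p for p in uniq if p not in index]
--     return known + unknown
-- ===== Notes on version B (the rewrite author's own statement) =====
-- stated objective: alternative
-- what changed: A orders the parsed tokens with a scan over DEFAULT_LEVELS plus a quadratic membership-dedup loop; B dedupes once with dict.fromkeys, partitions tokens into known/unknown via a precomputed level->position dict, and sorts the known ones by that index.
import Mathlib
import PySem

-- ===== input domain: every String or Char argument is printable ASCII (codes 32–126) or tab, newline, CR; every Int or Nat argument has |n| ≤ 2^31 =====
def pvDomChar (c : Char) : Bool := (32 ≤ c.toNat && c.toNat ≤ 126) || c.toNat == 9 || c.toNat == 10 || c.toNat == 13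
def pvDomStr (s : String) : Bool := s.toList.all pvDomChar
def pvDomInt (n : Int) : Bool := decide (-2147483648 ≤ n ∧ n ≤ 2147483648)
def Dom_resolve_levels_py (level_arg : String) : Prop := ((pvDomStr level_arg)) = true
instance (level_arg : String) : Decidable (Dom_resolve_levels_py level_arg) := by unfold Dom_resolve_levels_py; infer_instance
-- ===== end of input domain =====

-- B replaces A's two ordering scans (a pass over DEFAULT_LEVELS plus a dedup loop) by dedupe-once,
-- partition into known/unknown via an index dict, and a key-sort of the known part (objective: alternative).

def DEFAULT_LEVELS : List String := ["L0", "L1", "L2", "L3", "L4", "L5.1", "L5.2", "L6"]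

-- ===== PORT A =====
-- split(",") with a nonempty literal separator: PySem.Str.split? is always `some` here, `.getD []` just unwraps it
def resolve_levels_py (level_arg : String) : List String :=
  if level_arg = "" ∨ PySem.Str.lower level_arg = "all" then DEFAULT_LEVELS
  else
    let parts := ((PySem.Str.split? level_arg ",").getD []).foldl (fun acc token =>
      let t := PySem.Str.strip token
      if t = "" then acc
      else acc ++ [if PySem.Str.startswith (PySem.Str.upper t) "L" then PySem.Str.upper t else t]) []
    let ordered := DEFAULT_LEVELS.foldl (fun acc lvl => if lvl ∈ parts then acc ++ [lvl] else acc) []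
    parts.foldl (fun acc lvl => if lvl ∈ acc then acc else acc ++ [lvl]) ordered

-- ===== PORT B =====
-- {lvl: i for i, lvl in enumerate(DEFAULT_LEVELS)}
def levelIndex : PySem.Dict String Int :=
  (PySem.List.enumerate DEFAULT_LEVELS).foldl (fun d p => d.insert p.2 p.1) PySem.Dict.empty

def resolve_levels_py_alt (level_arg : String) : List String :=
  if level_arg = "" ∨ PySem.Str.lower level_arg = "all" then DEFAULT_LEVELS
  else
    let parts := ((PySem.Str.split? level_arg ",").getD []).filterMap (fun token =>
      let t := PySem.Str.strip token
      if t = "" then none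
      else some (if PySem.Str.startswith (PySem.Str.upper t) "L" then PySem.Str.upper t else t))
    let uniq := PySem.List.dedup parts
    let known := PySem.List.sorted (uniq.filter (fun p => levelIndex.contains p)) (fun p => levelIndex.getD p 0)
    let unknown := uniq.filter (fun p => !levelIndex.contains p)
    known ++ unknown

-- ===== PRECONDITION & SPEC =====
def Spec_resolve_levels_py (level_arg : String) (out : List String) : Prop := out = resolve_levels_py_alt level_arg
instance (level_arg : String) (out : List String) : Decidable (Spec_resolve_levels_py level_arg out) := by unfold Spec_resolve_levels_py; infer_instance

-- ===== CLAIM (what is proved, stated in full; the proofs are below) =====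
def Claim_equal_resolve_levels_py : Prop := ∀ (level_arg : String), Dom_resolve_levels_py level_arg → Spec_resolve_levels_py level_arg (resolve_levels_py level_arg)

-- ===== LEMMAS AND PROOFS =====

theorem levelIndex_contains (p : String) : levelIndex.contains p = decide (p ∈ DEFAULT_LEVELS) := by
  simp only [levelIndex, DEFAULT_LEVELS, PySem.Dict.contains, PySem.List.enumerate,
    PySem.Dict.insert, PySem.Dict.empty]
  apply Bool.eq_iff_iff.mpr
  simp
  tauto

theorem levels_nodup : DEFAULT_LEVELS.Nodup := by decide

theorem levels_key_sorted :
    DEFAULT_LEVELS.Pairwise (fun a b => levelIndex.getD a 0 < levelIndex.getD b 0) := by decide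

-- a 'for' loop appending 'f(x)' when f yields a value IS filterMap
theorem foldl_opt_append (f : String → Option String) (toks acc : List String) :
    toks.foldl (fun acc token => match f token with | none => acc | some y => acc ++ [y]) acc
    = acc ++ toks.filterMap f := by
  induction toks generalizing acc with
  | nil => simp
  | cons x xs ih => cases h : f x <;> simp [h, ih]

-- A's token loop builds exactly the filterMap B's comprehension builds
theorem partsA_eq (toks acc : List String) :
    toks.foldl (fun acc token =>
      let t := PySem.Str.strip token
      if t = "" then acc
      else acc ++ [if PySem.Str.startswith (PySem.Str.upper t) "L" then PySem.Str.upper t else t]) acc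
    = acc ++ toks.filterMap (fun token =>
      let t := PySem.Str.strip token
      if t = "" then none
      else some (if PySem.Str.startswith (PySem.Str.upper t) "L" then PySem.Str.upper t else t)) := by
  rw [PySem.List.foldl_congr_mem toks _ (fun acc token =>
      match (fun token =>
        let t := PySem.Str.strip token
        if t = "" then none
        else some (if PySem.Str.startswith (PySem.Str.upper t) "L" then PySem.Str.upper t else t)) token with
      | none => acc | some y => acc ++ [y]) acc ?_]
  · exact foldl_opt_append _ toks acc
  · intro acc x _
    by_cases h : PySem.Str.strip x = "" <;> simp [h]

-- the ordering phase: A's two loops vs B's sort-plus-partition, over any parts list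
theorem tail_eq (parts : List String) :
    parts.foldl (fun acc lvl => if lvl ∈ acc then acc else acc ++ [lvl])
      (DEFAULT_LEVELS.foldl (fun acc lvl => if lvl ∈ parts then acc ++ [lvl] else acc) [])
    = PySem.List.sorted ((PySem.List.dedup parts).filter (fun p => levelIndex.contains p))
        (fun p => levelIndex.getD p 0)
      ++ (PySem.List.dedup parts).filter (fun p => !levelIndex.contains p) := by
  rw [PySem.List.foldl_append_ite_eq_filter (fun lvl => lvl ∈ parts) DEFAULT_LEVELS [], List.nil_append]
  set ordered := DEFAULT_LEVELS.filter (fun x => decide (x ∈ parts)) with hord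
  have hordnd : ordered.Nodup := levels_nodup.filter _
  have hordmem : ∀ y, y ∈ ordered ↔ y ∈ DEFAULT_LEVELS ∧ y ∈ parts := by
    intro y; simp [hord, List.mem_filter]
  -- A's dedup loop is Set.update
  have hstep : parts.foldl (fun acc lvl => if lvl ∈ acc then acc else acc ++ [lvl]) ordered
      = PySem.Set.update ordered parts := by
    show _ = parts.foldl PySem.Set.add ordered
    exact (PySem.List.foldl_congr_mem parts _ _ ordered
      (fun acc x _ => (PySem.Set.add_eq_ite acc x).symm))
  rw [hstep, PySem.Set.update_eq_append_filter]
  -- unknown halves agree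
  have hunk : (PySem.Set.ofList parts).filter (fun y => !PySem.Set.contains ordered y)
      = (PySem.List.dedup parts).filter (fun p => !levelIndex.contains p) := by
    rw [PySem.List.dedup_eq_ofList]
    apply List.filter_congr
    intro y hy
    have hyp : y ∈ parts := (PySem.Set.mem_ofList parts y).mp hy
    have : PySem.Set.contains ordered y = levelIndex.contains y := by
      rw [levelIndex_contains]
      apply Bool.eq_iff_iff.mpr
      simp [hordmem, hyp]
    rw [this]
  -- known halves agree
  have hkn : PySem.List.sorted ((PySem.List.dedup parts).filter (fun p => levelIndex.contains p))
      (fun p => levelIndex.getD p 0) = ordered := by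
    apply PySem.List.sorted_eq_of_perm_of_pairwise_lt
    · rw [PySem.List.dedup_eq_ofList]
      rw [List.perm_ext_iff_of_nodup hordnd ((PySem.Set.nodup_ofList parts).filter _)]
      intro y
      simp only [List.mem_filter, PySem.Set.mem_ofList, hordmem, levelIndex_contains]
      constructor
      · rintro ⟨h1, h2⟩; exact ⟨h2, by simp [h1]⟩
      · rintro ⟨h1, h2⟩; exact ⟨by simpa using h2, h1⟩
    · exact levels_key_sorted.sublist List.filter_sublist
  rw [hunk, hkn]

-- ===== VERDICT (by name: the statement is the Claim_ definition above) =====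
theorem resolve_levels_py_spec : Claim_equal_resolve_levels_py := by
  intro level_arg _
  unfold Spec_resolve_levels_py resolve_levels_py resolve_levels_py_alt
  by_cases h : level_arg = "" ∨ PySem.Str.lower level_arg = "all"
  · simp only [if_pos h]
  · simp only [if_neg h, partsA_eq, List.nil_append]
    exact tail_eq _
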